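-- pv_equiv track=rewrite | github.com/craigferrere/PCG_Dashboard | app.py | flatten_author_blocks
-- ===== SOURCE A (Python) =====
-- def flatten_author_blocks(text):
--     lines = text.splitlines()
--     new_lines = []
--     i = 0
--
--     while i < len(lines):
--         line = lines[i]
--
--         if line.startswith("# Authors:"):
--             # Start collecting block
--             block = [line.replace("# Authors:", "").strip()]
--             i += 1
--             blank_seen = False
--
--             while i < len(lines):
--                 current = lines[i].strip()
--
--                 # Stop if we hit a new section or a second blank line
--                 if current.startswith("#"):
--                     break
--                 if current == "":
--                     if blank_seen:
--                         break
--                     blank_seen = True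
--                     i += 1
--                     continue
--
--                 block.append(current)
--                 i += 1
--
--             flattened = " ".join(block).strip()
--             new_lines.append(f"# Author: {flattened}")
--         else:
--             new_lines.append(line)
--             i += 1
--
--     return "\n".join(new_lines)
-- ===== SOURCE B (Python) =====
-- def flatten_author_blocks(text):
--     out = []
--     block = None          # None = not inside an author block
--     blank_seen = False
--     for line in text.splitlines():
--         if block is not None:
--             cur = line.strip()
--             if cur.startswith("#"):
--                 out.append("# Author: " + " ".join(block).strip())
--                 block = None
--                 # fall through: re-dispatch this line as a normal line
--             elif cur == "":
--                 if blank_seen: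
--                     out.append("# Author: " + " ".join(block).strip())
--                     block = None
--                     # fall through: re-dispatch this line
--                 else:
--                     blank_seen = True
--                     continue
--             else:
--                 block.append(cur)
--                 continue
--         if line.startswith("# Authors:"):
--             block = [line.replace("# Authors:", "").strip()]
--             blank_seen = False
--         else:
--             out.append(line)
--     if block is not None:
--         out.append("# Author: " + " ".join(block).strip())
--     return "\n".join(out)
-- ===== Notes on version B (the rewrite author's own statement) =====
-- stated objective: alternative
-- what changed: Replaced A's nested while-loops with manual index management and re-dispatch of the breaking line by a single for-loop over splitlines() maintaining explicit state (open block list, blank_seen flag) with an end-of-input flush.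
import Mathlib
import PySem

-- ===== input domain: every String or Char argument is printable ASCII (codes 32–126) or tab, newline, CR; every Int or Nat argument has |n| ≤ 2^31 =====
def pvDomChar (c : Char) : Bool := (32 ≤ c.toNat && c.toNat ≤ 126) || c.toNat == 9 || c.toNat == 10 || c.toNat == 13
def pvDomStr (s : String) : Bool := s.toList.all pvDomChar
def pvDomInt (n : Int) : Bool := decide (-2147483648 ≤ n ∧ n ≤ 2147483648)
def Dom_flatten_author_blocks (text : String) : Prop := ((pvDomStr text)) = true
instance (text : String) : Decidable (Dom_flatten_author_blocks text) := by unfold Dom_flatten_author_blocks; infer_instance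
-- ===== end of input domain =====

-- B replaces A's nested while-loops (inner loop consuming the block, index re-dispatch)
-- by a single pass over the lines with explicit state (open block, blank_seen); objective: alternative.

-- ===== PORT A =====
-- A's inner while loop: consumes lines into the block until a '#' line or a second blank;
-- returns the final block and the unconsumed remainder (the breaking line is NOT consumed).
def pvInnerA : List String → List String → Bool → List String × List String
  | [], block, _ => (block, [])
  | l :: rest, block, blank_seen =>
    let current := PySem.Str.strip l
    if PySem.Str.startswith current "#" then (block, l :: rest)
    else if current == "" then
      if blank_seen then (block, l :: rest)
      else pvInnerA rest block true
    else pvInnerA rest (block ++ [current]) blank_seen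

-- termination helper for A's outer loop: the inner loop never grows the remainder
theorem pvInnerA_len : ∀ (lines block : List String) (bs : Bool),
    (pvInnerA lines block bs).2.length ≤ lines.length := by
  intro lines
  induction lines with
  | nil => intro block bs; simp [pvInnerA]
  | cons l rest ih =>
    intro block bs
    simp only [pvInnerA]
    split
    · simp
    · split
      · split
        · simp
        · exact Nat.le_succ_of_le (ih _ _)
      · exact Nat.le_succ_of_le (ih _ _)

-- A's outer while loop over the remaining lines
def pvOuterA : List String → List String
  | [] => []
  | l :: rest =>
    if PySem.Str.startswith l "# Authors:" then
      let r := pvInnerA rest [PySem.Str.strip (PySem.Str.replace l "# Authors:" "")] false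
      ("# Author: " ++ PySem.Str.strip (PySem.Str.join " " r.1)) :: pvOuterA r.2
    else l :: pvOuterA rest
  termination_by lines => lines.length
  decreasing_by
    · exact Nat.lt_succ_of_le (pvInnerA_len ..)
    · simp

def flatten_author_blocks (text : String) : String :=
  PySem.Str.join "\n" (pvOuterA (PySem.Str.splitlines text))

-- ===== PORT B =====
-- B's single for-loop with state: out so far, the open block (none = not in a block), blank_seen.
-- On a terminating line the block is flushed and the same line is re-dispatched in the same step.
def pvLoopB : List String → List String → Option (List String) → Bool → List String
  | [], out, none, _ => out
  | [], out, some block, _ =>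
      out ++ ["# Author: " ++ PySem.Str.strip (PySem.Str.join " " block)]
  | l :: rest, out, some block, blank_seen =>
    let cur := PySem.Str.strip l
    if PySem.Str.startswith cur "#" then
      let out' := out ++ ["# Author: " ++ PySem.Str.strip (PySem.Str.join " " block)]
      if PySem.Str.startswith l "# Authors:" then
        pvLoopB rest out' (some [PySem.Str.strip (PySem.Str.replace l "# Authors:" "")]) false
      else pvLoopB rest (out' ++ [l]) none blank_seen
    else if cur == "" then
      if blank_seen then
        let out' := out ++ ["# Author: " ++ PySem.Str.strip (PySem.Str.join " " block)]
        if PySem.Str.startswith l "# Authors:" then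
          pvLoopB rest out' (some [PySem.Str.strip (PySem.Str.replace l "# Authors:" "")]) false
        else pvLoopB rest (out' ++ [l]) none blank_seen
      else pvLoopB rest out (some block) true
    else pvLoopB rest out (some (block ++ [cur])) blank_seen
  | l :: rest, out, none, blank_seen =>
    if PySem.Str.startswith l "# Authors:" then
      pvLoopB rest out (some [PySem.Str.strip (PySem.Str.replace l "# Authors:" "")]) false
    else pvLoopB rest (out ++ [l]) none blank_seen

def flatten_author_blocks_alt (text : String) : String :=
  PySem.Str.join "\n" (pvLoopB (PySem.Str.splitlines text) [] none false)

-- ===== PRECONDITION & SPEC =====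
def Spec_flatten_author_blocks (text : String) (out : String) : Prop := out = flatten_author_blocks_alt text
instance (text : String) (out : String) : Decidable (Spec_flatten_author_blocks text out) := by unfold Spec_flatten_author_blocks; infer_instance

-- ===== CLAIM (what is proved, stated in full; the proofs are below) =====
def Claim_equal_flatten_author_blocks : Prop := ∀ (text : String), Dom_flatten_author_blocks text → Spec_flatten_author_blocks text (flatten_author_blocks text)

-- ===== LEMMAS AND PROOFS =====

-- outside a block, B's loop ignores blank_seen
theorem pvLoopB_none_bs : ∀ (lines out : List String) (bs bs' : Bool),
    pvLoopB lines out none bs = pvLoopB lines out none bs' := by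
  intro lines
  induction lines with
  | nil => intro out bs bs'; rfl
  | cons l rest ih =>
    intro out bs bs'
    simp only [pvLoopB]
    split
    · rfl
    · exact ih _ _ _

-- bridge: B inside a block behaves as A's inner loop followed by a flush and restart outside a block
theorem pvLoopB_some : ∀ (lines block out : List String) (bs : Bool),
    pvLoopB lines out (some block) bs =
      pvLoopB (pvInnerA lines block bs).2
        (out ++ ["# Author: " ++ PySem.Str.strip (PySem.Str.join " " (pvInnerA lines block bs).1)])
        none false := by
  intro lines
  induction lines with
  | nil => intro block out bs; simp [pvLoopB, pvInnerA]
  | cons l rest ih =>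
    intro block out bs
    simp only [pvLoopB, pvInnerA]
    split
    · -- '#' line terminates the block; B re-dispatches it in the same step
      simp only [pvLoopB]
      split
      · rfl
      · exact pvLoopB_none_bs _ _ _ _
    · split
      · -- blank line
        split
        · -- second blank: terminate and re-dispatch
          simp only [pvLoopB]
          split
          · rfl
          · exact pvLoopB_none_bs _ _ _ _
        · exact ih _ _ _
      · exact ih _ _ _

-- outside a block, B's loop produces exactly A's outer loop output
theorem pvLoopB_eq_outer : ∀ (n : Nat) (lines : List String), lines.length ≤ n →
    ∀ (out : List String), pvLoopB lines out none false = out ++ pvOuterA lines := by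
  intro n
  induction n with
  | zero =>
    intro lines h out
    have : lines = [] := List.eq_nil_of_length_eq_zero (Nat.le_zero.mp h)
    subst this; simp [pvLoopB, pvOuterA]
  | succ n ih =>
    intro lines h out
    match lines with
    | [] => simp [pvLoopB, pvOuterA]
    | l :: rest =>
      simp only [pvLoopB, pvOuterA]
      split
      · rw [pvLoopB_some]
        have hlen : (pvInnerA rest [PySem.Str.strip (PySem.Str.replace l "# Authors:" "")] false).2.length ≤ n :=
          le_trans (pvInnerA_len ..) (Nat.succ_le_succ_iff.mp h)
        rw [ih _ hlen]
        simp
      · rw [ih rest (Nat.succ_le_succ_iff.mp h)]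
        simp

-- ===== VERDICT (by name: the statement is the Claim_ definition above) =====
theorem flatten_author_blocks_spec : Claim_equal_flatten_author_blocks := by
  intro text _
  unfold Spec_flatten_author_blocks flatten_author_blocks flatten_author_blocks_alt
  rw [pvLoopB_eq_outer (PySem.Str.splitlines text).length _ le_rfl]
  simp
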